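-- pv_equiv track=rewrite | github.com/pressxtohonk/jane-street-puzzles | bin/self_dividing.py | self_dividing_before
-- ===== SOURCE A (Python) =====
-- def self_dividing_before(n: int):
--     for i in range(n):
--         digits = set(str(i))
--         if '0' in digits:
--             continue
--         if any(i % int(d) != 0 for d in digits):
--             continue
--         yield i
-- ===== SOURCE B (Python) =====
-- def self_dividing_before(n: int):
--     # arithmetic digit loop with early exit: no string, no set, one pass
--     def ok(i: int) -> bool:
--         m = i
--         while m > 0:
--             d = m % 10
--             if d == 0 or i % d != 0:
--                 return False
--             m //= 10
--         return i > 0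
--     for i in range(n):
--         if ok(i):
--             yield i
-- ===== Notes on version B (the rewrite author's own statement) =====
-- stated objective: faster
-- what changed: Replaces the per-number string conversion, set construction and two-pass membership+any check with a single arithmetic while-loop that extracts decimal digits by modulus and floor division and exits early on the first failing digit.
import Mathlib
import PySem

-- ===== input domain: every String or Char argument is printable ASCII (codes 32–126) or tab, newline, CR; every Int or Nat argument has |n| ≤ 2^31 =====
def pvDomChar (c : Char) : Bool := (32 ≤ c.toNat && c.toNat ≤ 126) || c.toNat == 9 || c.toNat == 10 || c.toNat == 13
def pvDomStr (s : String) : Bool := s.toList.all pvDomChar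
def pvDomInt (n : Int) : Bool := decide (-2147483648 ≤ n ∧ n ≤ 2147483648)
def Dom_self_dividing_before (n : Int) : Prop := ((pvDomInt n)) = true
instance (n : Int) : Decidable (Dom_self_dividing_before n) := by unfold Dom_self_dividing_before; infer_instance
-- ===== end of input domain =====

-- B replaces A's per-number string/set digit check by one arithmetic digit loop with early exit
-- (measured constant-factor speed-up); return values proved equal for every n.

-- ===== PORT A =====
-- A yields values from a generator; the port returns the list of yielded values, in order.
def self_dividing_before (n : Int) : List Int :=
  (PySem.List.pyRange 0 n 1).foldl
    (fun acc i =>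
      let digits : PySem.Set Char := PySem.Set.ofList (PySem.Int.toChars i)
      if PySem.Set.contains digits '0' then acc
      else if digits.any (fun d =>
          -- int(d) on the one-char string d; the getD 0 default is unreachable ('0' was excluded above)
          !(PySem.Int.mod i ((PySem.Int.ofChars? [d]).getD 0) == 0)) then acc
      else acc ++ [i])
    []

-- ===== PORT B =====
-- the 'while m > 0' loop of Source B's ok; m stays a Nat: ok is only called with i ≥ 0 (i from range(n)),
-- so m = i ≥ 0 throughout and Python's // 10 and % 10 agree with Nat division here.
def sdAltOkLoop (i : Int) (m : Nat) : Bool :=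
  if h : 0 < m then
    let d := m % 10
    if d == 0 || !(PySem.Int.mod i (d : Int) == 0) then false
    else sdAltOkLoop i (m / 10)
  else decide (0 < i)
termination_by m
decreasing_by exact Nat.div_lt_self h (by norm_num)

def sdAltOk (i : Int) : Bool := sdAltOkLoop i i.toNat

def self_dividing_before_alt (n : Int) : List Int :=
  (PySem.List.pyRange 0 n 1).filter (fun i => sdAltOk i)

-- ===== PRECONDITION & SPEC =====
def Spec_self_dividing_before (n : Int) (out : List Int) : Prop := out = self_dividing_before_alt n
instance (n : Int) (out : List Int) : Decidable (Spec_self_dividing_before n out) := by unfold Spec_self_dividing_before; infer_instance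

-- ===== CLAIM (what is proved, stated in full; the proofs are below) =====
def Claim_equal_self_dividing_before : Prop := ∀ (n : Int), Dom_self_dividing_before n → Spec_self_dividing_before n (self_dividing_before n)

-- ===== LEMMAS AND PROOFS =====

-- A's per-i keep condition, extracted from the fold body
def pACond (i : Int) : Bool :=
  !(PySem.Set.contains (PySem.Set.ofList (PySem.Int.toChars i)) '0')
  && !((PySem.Set.ofList (PySem.Int.toChars i)).any (fun d =>
        !(PySem.Int.mod i ((PySem.Int.ofChars? [d]).getD 0) == 0)))

-- the digit-wise check, as a predicate on a digit character
def chkDigit (i : Int) (c : Char) : Bool :=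
  !(c == '0') && (PySem.Int.mod i ((PySem.Int.ofChars? [c]).getD 0) == 0)

-- fuel-free 'all digits of n satisfy p' over the digit characters, least significant first
def digAll (p : Char → Bool) (n : Nat) : Bool :=
  p (Nat.digitChar (n % 10)) && (if h : n / 10 = 0 then true else digAll p (n / 10))
termination_by n
decreasing_by exact Nat.div_lt_self (by omega) (by norm_num)

lemma all_toDigitsCore (p : Char → Bool) (fuel n : Nat) (ds : List Char) (h : n < fuel) :
    (Nat.toDigitsCore 10 fuel n ds).all p = (digAll p n && ds.all p) := by
  induction fuel generalizing n ds with
  | zero => omega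
  | succ fuel ih =>
    rw [Nat.toDigitsCore, digAll]
    by_cases h0 : n / 10 = 0
    · simp [h0]
    · rw [if_neg h0, dif_neg h0, ih _ _ (by omega)]
      rw [digAll]
      by_cases h1 : n / 10 / 10 = 0 <;>
        simp [h1, List.all_cons, Bool.and_assoc, Bool.and_comm, Bool.and_left_comm]

lemma chk_digitChar (i : Int) (r : Nat) (hr : r < 10) :
    chkDigit i (Nat.digitChar r)
      = (!(r == 0) && (PySem.Int.mod i (r : Int) == 0)) := by
  have h1 : (PySem.Int.ofChars? [Nat.digitChar r]).getD 0 = (r : Int) := by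
    interval_cases r <;> decide
  have h2 : (Nat.digitChar r == '0') = (r == 0) := by
    interval_cases r <;> decide
  rw [chkDigit, h1, h2]

lemma okLoop_eq_digAll (i : Int) (hi : 0 < i) (m : Nat) (hm : 0 < m) :
    sdAltOkLoop i m = digAll (chkDigit i) m := by
  induction m using Nat.strong_induction_on with
  | _ m ih =>
    rw [sdAltOkLoop, dif_pos hm, digAll, chk_digitChar i (m % 10) (by omega)]
    by_cases hd : (m % 10 : Nat) = 0
    · have h1 : ((m % 10 : Nat) == 0) = true := beq_iff_eq.mpr hd
      simp [h1]
    · have h1 : ((m % 10 : Nat) == 0) = false := beq_eq_false_iff_ne.mpr hd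
      by_cases hmod : PySem.Int.mod i ((m : Int) % 10) = 0
      · have h2 : (PySem.Int.mod i ((m : Int) % 10) == 0) = true := beq_iff_eq.mpr hmod
        by_cases h0 : m / 10 = 0
        · simp [h1, hmod, h0, sdAltOkLoop, hi]
        · simp [h1, hmod, h0,
            ih (m / 10) (Nat.div_lt_self hm (by norm_num)) (Nat.pos_of_ne_zero h0)]
      · have h2 : (PySem.Int.mod i ((m : Int) % 10) == 0) = false :=
          beq_eq_false_iff_ne.mpr hmod
        simp [h1, h2]

lemma pACond_eq_all (i : Int) (hi : 0 ≤ i) :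
    pACond i = (Nat.toDigits 10 i.toNat).all (chkDigit i) := by
  have htc : PySem.Int.toChars i = Nat.toDigits 10 i.toNat := by
    rw [PySem.Int.toChars, if_neg (by omega)]
  rw [Bool.eq_iff_iff]
  simp only [List.all_eq_true]
  simp [pACond, htc, chkDigit]
  constructor
  · rintro ⟨h0, hq⟩ c hc
    exact ⟨fun he => h0 (he ▸ hc), hq c hc⟩
  · intro h
    exact ⟨fun hc => (h '0' hc).1 rfl, fun c hc => (h c hc).2⟩

lemma pACond_eq_sdAltOk (i : Int) (hi : 0 ≤ i) : pACond i = sdAltOk i := by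
  rcases eq_or_lt_of_le hi with h | h
  · have hA : pACond (0 : Int) = false := by decide
    have hB : sdAltOk (0 : Int) = false := by
      rw [sdAltOk, sdAltOkLoop]
      simp
    rw [← h, hA, hB]
  · have hm : 0 < i.toNat := by omega
    rw [pACond_eq_all i hi, sdAltOk, okLoop_eq_digAll i h i.toNat hm]
    rw [show Nat.toDigits 10 i.toNat = Nat.toDigitsCore 10 (i.toNat + 1) i.toNat [] from rfl]
    rw [all_toDigitsCore _ _ _ _ (by omega)]
    simp

lemma A_eq_filter (n : Int) :
    self_dividing_before n = (PySem.List.pyRange 0 n 1).filter (fun i => pACond i) := by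
  rw [self_dividing_before]
  have hbody : (fun (acc : List Int) i =>
      let digits : PySem.Set Char := PySem.Set.ofList (PySem.Int.toChars i)
      if PySem.Set.contains digits '0' then acc
      else if digits.any (fun d =>
          !(PySem.Int.mod i ((PySem.Int.ofChars? [d]).getD 0) == 0)) then acc
      else acc ++ [i])
      = (fun acc i => if pACond i then acc ++ [i] else acc) := by
    funext acc i
    by_cases h1 : '0' ∈ PySem.Int.toChars i
    · simp [pACond, h1]
    · by_cases h2 : ∃ c ∈ PySem.Int.toChars i,
          ¬ PySem.Int.mod i ((PySem.Int.ofChars? [c]).getD 0) = 0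
      · simp [pACond, h1, h2]
      · simp [pACond, h1, h2]
  rw [hbody, PySem.List.foldl_append_if]
  simp

-- ===== VERDICT (by name: the statement is the Claim_ definition above) =====
theorem self_dividing_before_spec : Claim_equal_self_dividing_before := by
  intro n _
  unfold Spec_self_dividing_before
  rw [A_eq_filter, self_dividing_before_alt]
  apply List.filter_congr
  intro i hi
  have h0 : 0 ≤ i := ((PySem.List.mem_pyRange_one).mp hi).1
  exact pACond_eq_sdAltOk i h0
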